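-- pv_equiv track=rewrite | github.com/ucx-code/VerifAI | source/design-time/pipeline_undeterminism.py | pursuit
-- ===== SOURCE A (Python) =====
-- def pursuit(patient_data, risk_factors, risk_threshold=13):
--
--     risk=0
--
--     for i in range(0, len(risk_factors)):
--         factor = risk_factors[i]
--
--         if factor == 'Age':
--             age = patient_data[i]
--             if age >= 50 and age <= 59:
--                 risk += 8
--             elif age >= 60 and age <= 69:
--                 risk += 9
--             elif age >= 70 and age <= 79:
--                 risk += 11
--             elif age >= 80:
--                 risk += 12
--
--         elif factor == 'SEX':
--             if patient_data[i] == 1: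
--                 risk += 1
--
--         elif factor == 'CCS>II':
--             if patient_data[i] == 1:
--                 risk += 2
--
--         elif factor == 'hf':
--             if patient_data[i] == 1:
--                 risk += 2
--
--         elif factor == 'DEP ST':
--             if patient_data[i] == 1:
--                 risk += 1
--
--
--     if risk >= risk_threshold:
--         patient_in_risk=True
--     else:
--         patient_in_risk=False
--
--     return patient_in_risk
-- ===== SOURCE B (Python) =====
-- # Count-then-weight rewrite: collect factor names whose value is 1, multiply
-- # category counts by their weights, and add a closed-form arithmetic age score
-- # (sum of boolean step increments) over all 'Age' entries; no branch cascade.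
-- def pursuit(patient_data, risk_factors, risk_threshold=13):
--     pairs = list(zip(patient_data, risk_factors))
--     ones = [f for v, f in pairs if v == 1]
--     risk = (ones.count('SEX') + 2 * ones.count('CCS>II')
--             + 2 * ones.count('hf') + ones.count('DEP ST')
--             + sum(8 * (a >= 50) + (a >= 60) + 2 * (a >= 70) + (a >= 80)
--                   for a, f in pairs if f == 'Age'))
--     return risk >= risk_threshold
-- ===== Notes on version B (the rewrite author's own statement) =====
-- stated objective: alternative
-- what changed: Replaced the per-element if/elif accumulation by staged aggregation: collect the factor names whose value is 1, multiply each category's count by its weight, and score ages with a closed-form sum of boolean step increments (8*(a>=50)+(a>=60)+2*(a>=70)+(a>=80)) instead of the range cascade.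
-- outside the precondition, e.g. on pursuit([], ['SEX'], 1): A raises IndexError, B returns False
import Mathlib
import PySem

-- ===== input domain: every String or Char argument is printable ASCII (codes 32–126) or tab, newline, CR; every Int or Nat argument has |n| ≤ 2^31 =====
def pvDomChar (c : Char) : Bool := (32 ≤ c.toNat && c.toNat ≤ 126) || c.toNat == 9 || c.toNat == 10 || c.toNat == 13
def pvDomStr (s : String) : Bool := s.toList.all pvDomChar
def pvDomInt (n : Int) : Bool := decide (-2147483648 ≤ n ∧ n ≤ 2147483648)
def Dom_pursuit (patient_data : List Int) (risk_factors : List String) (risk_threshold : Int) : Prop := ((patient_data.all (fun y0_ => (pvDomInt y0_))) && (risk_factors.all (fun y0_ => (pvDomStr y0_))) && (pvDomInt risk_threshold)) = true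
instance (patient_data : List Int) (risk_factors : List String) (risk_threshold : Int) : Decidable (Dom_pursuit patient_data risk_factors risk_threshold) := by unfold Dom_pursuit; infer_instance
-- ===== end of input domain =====

-- B aggregates in stages: category counts of value-1 factors times weights, plus a
-- closed-form boolean-step age score; return-value equivalence only, neither mutates.

-- ===== PORT A =====
def pursuit (patient_data : List Int) (risk_factors : List String) (risk_threshold : Int) : Bool :=
  -- literal transliteration; patient_data[i] is only read where Pre_ guarantees it is in range,
  -- so the getD default is never used on admitted inputs
  let risk := (PySem.List.pyRange 0 risk_factors.length 1).foldl (fun risk i =>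
    let factor := PySem.List.pyGetD risk_factors i ""
    if factor == "Age" then
      let age := PySem.List.pyGetD patient_data i 0
      if age ≥ 50 ∧ age ≤ 59 then risk + 8
      else if age ≥ 60 ∧ age ≤ 69 then risk + 9
      else if age ≥ 70 ∧ age ≤ 79 then risk + 11
      else if age ≥ 80 then risk + 12
      else risk
    else if factor == "SEX" then
      (if PySem.List.pyGetD patient_data i 0 == 1 then risk + 1 else risk)
    else if factor == "CCS>II" then
      (if PySem.List.pyGetD patient_data i 0 == 1 then risk + 2 else risk)
    else if factor == "hf" then
      (if PySem.List.pyGetD patient_data i 0 == 1 then risk + 2 else risk)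
    else if factor == "DEP ST" then
      (if PySem.List.pyGetD patient_data i 0 == 1 then risk + 1 else risk)
    else risk) 0
  decide (risk ≥ risk_threshold)

-- ===== PORT B =====
def pursuit_alt (patient_data : List Int) (risk_factors : List String) (risk_threshold : Int) : Bool :=
  let pairs := patient_data.zip risk_factors
  let ones := (pairs.filter (fun vf => vf.1 == 1)).map (fun vf => vf.2)
  let risk : Int := (ones.count "SEX" : Int) + 2 * (ones.count "CCS>II" : Int)
      + 2 * (ones.count "hf" : Int) + (ones.count "DEP ST" : Int)
      + ((pairs.filter (fun vf => vf.2 == "Age")).map (fun vf =>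
          8 * (if vf.1 ≥ 50 then (1:Int) else 0) + (if vf.1 ≥ 60 then (1:Int) else 0)
            + 2 * (if vf.1 ≥ 70 then (1:Int) else 0) + (if vf.1 ≥ 80 then (1:Int) else 0))).sum
  decide (risk ≥ risk_threshold)

-- ===== PRECONDITION & SPEC =====
def pvKnown : List String := ["Age", "SEX", "CCS>II", "hf", "DEP ST"]

-- Pre_ excludes exactly the inputs on which A raises IndexError: a known factor at an
-- index with no patient value.
def Pre_pursuit (patient_data : List Int) (risk_factors : List String) (risk_threshold : Int) : Prop :=
  ∀ i : Nat, i < risk_factors.length → risk_factors.getD i "" ∈ pvKnown → i < patient_data.length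
instance (patient_data : List Int) (risk_factors : List String) (risk_threshold : Int) : Decidable (Pre_pursuit patient_data risk_factors risk_threshold) := by unfold Pre_pursuit; infer_instance

def pvWitness_pursuit : List Int × List String × Int := ([55, 1, 0], ["Age", "SEX", "hf"], 9)

def Spec_pursuit (patient_data : List Int) (risk_factors : List String) (risk_threshold : Int) (out : Bool) : Prop := out = pursuit_alt patient_data risk_factors risk_threshold
instance (patient_data : List Int) (risk_factors : List String) (risk_threshold : Int) (out : Bool) : Decidable (Spec_pursuit patient_data risk_factors risk_threshold out) := by unfold Spec_pursuit; infer_instance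

-- ===== CLAIM (what is proved, stated in full; the proofs are below) =====
def Claim_equal_pursuit : Prop := ∀ (patient_data : List Int) (risk_factors : List String) (risk_threshold : Int), Dom_pursuit patient_data risk_factors risk_threshold → Pre_pursuit patient_data risk_factors risk_threshold → Spec_pursuit patient_data risk_factors risk_threshold (pursuit patient_data risk_factors risk_threshold)

-- ===== LEMMAS AND PROOFS =====

-- per-pair contribution, the common spec both programs sum
def pvContrib (vf : Int × String) : Int :=
  if vf.2 == "Age" then
    8 * (if vf.1 ≥ 50 then (1:Int) else 0) + (if vf.1 ≥ 60 then (1:Int) else 0)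
      + 2 * (if vf.1 ≥ 70 then (1:Int) else 0) + (if vf.1 ≥ 80 then (1:Int) else 0)
  else if vf.1 == 1 then
    (if vf.2 == "SEX" then 1 else if vf.2 == "CCS>II" then 2 else if vf.2 == "hf" then 2
     else if vf.2 == "DEP ST" then 1 else 0)
  else 0

-- A's loop body, named for the proofs
def pvBodyA (pd : List Int) (rf : List String) (risk i : Int) : Int :=
  let factor := PySem.List.pyGetD rf i ""
  if factor == "Age" then
    let age := PySem.List.pyGetD pd i 0
    if age ≥ 50 ∧ age ≤ 59 then risk + 8
    else if age ≥ 60 ∧ age ≤ 69 then risk + 9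
    else if age ≥ 70 ∧ age ≤ 79 then risk + 11
    else if age ≥ 80 then risk + 12
    else risk
  else if factor == "SEX" then
    (if PySem.List.pyGetD pd i 0 == 1 then risk + 1 else risk)
  else if factor == "CCS>II" then
    (if PySem.List.pyGetD pd i 0 == 1 then risk + 2 else risk)
  else if factor == "hf" then
    (if PySem.List.pyGetD pd i 0 == 1 then risk + 2 else risk)
  else if factor == "DEP ST" then
    (if PySem.List.pyGetD pd i 0 == 1 then risk + 1 else risk)
  else risk

lemma pvBodyA_zero (f : String) (rf : List String) (v : Int) (pd : List Int) (acc : Int) :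
    pvBodyA (v :: pd) (f :: rf) acc 0 = acc + pvContrib (v, f) := by
  simp only [pvBodyA, pvContrib, PySem.List.pyGetD_zero_cons]
  split_ifs <;> omega

lemma pvBodyA_shift (f : String) (rf : List String) (v : Int) (pd : List Int) (acc : Int) (k : Nat) :
    pvBodyA (v :: pd) (f :: rf) acc (1 + (k : Int)) = pvBodyA pd rf acc (k : Int) := by
  have h1 : (1 + (k : Int)) = ((k + 1 : Nat) : Int) := by push_cast; ring
  simp only [pvBodyA, h1, PySem.List.pyGetD_natCast, List.getD_cons_succ]

lemma pvFoldl_id {α : Type} (l : List α) (acc : Int) : l.foldl (fun a _ => a) acc = acc := by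
  induction l generalizing acc with
  | nil => rfl
  | cons x l ih => simpa using ih acc

lemma pvBodyA_unknown (pd : List Int) (rf : List String) (acc i : Int)
    (h : PySem.List.pyGetD rf i "" ∉ pvKnown) : pvBodyA pd rf acc i = acc := by
  simp only [pvKnown, List.mem_cons, List.not_mem_nil, or_false, not_or] at h
  obtain ⟨hA, h1, h2, h3, h4⟩ := h
  simp [pvBodyA, hA, h1, h2, h3, h4]

-- A's index loop equals the sum of pvContrib over the zipped pairs
lemma pvLoopA_eq (rf : List String) (pd : List Int) (acc : Int)
    (hpre : ∀ i : Nat, i < rf.length → rf.getD i "" ∈ pvKnown → i < pd.length) :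
    (PySem.List.pyRange 0 rf.length 1).foldl (pvBodyA pd rf) acc
      = acc + ((pd.zip rf).map pvContrib).sum := by
  induction rf generalizing pd acc with
  | nil => simp [PySem.List.pyRange_one_eq_nil]
  | cons f rf ih =>
    cases pd with
    | nil =>
      have hbody : ∀ (a x : Int), x ∈ PySem.List.pyRange 0 ((f :: rf).length : Int) 1 →
          pvBodyA [] (f :: rf) a x = (fun (a : Int) (_ : Int) => a) a x := by
        intro a x hx
        have hx' := PySem.List.mem_pyRange_one.mp hx
        refine pvBodyA_unknown [] (f :: rf) a x ?_
        intro hk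
        have hnn : x = ((x.toNat : Nat) : Int) := by omega
        have hlt : x.toNat < (f :: rf).length := by
          simp at hx' ⊢; omega
        have := hpre x.toNat hlt (by rwa [hnn, PySem.List.pyGetD_natCast] at hk)
        simp at this
      rw [PySem.List.foldl_congr_mem _ _ _ _ hbody, pvFoldl_id]
      simp
    | cons v pd =>
      have hlen : (((f :: rf).length : Int)) = 1 + (rf.length : Int) := by simp; ring
      rw [hlen, PySem.List.pyRange_one_cons (by positivity)]
      simp only [List.foldl_cons, zero_add]
      rw [pvBodyA_zero]
      have hsh : PySem.List.pyRange 1 (1 + (rf.length : Int)) 1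
          = (PySem.List.pyRange 0 (rf.length : Int) 1).map (fun k => 1 + k) := by
        simp [PySem.List.pyRange_one]
      have hbody : ∀ (a x : Int), x ∈ PySem.List.pyRange 0 ((rf.length : Int)) 1 →
          (fun (a k : Int) => pvBodyA (v :: pd) (f :: rf) a (1 + k)) a x = pvBodyA pd rf a x := by
        intro a x hx
        have hx' := PySem.List.mem_pyRange_one.mp hx
        obtain ⟨n, rfl⟩ : ∃ n : Nat, x = (n : Int) := ⟨x.toNat, by omega⟩
        exact pvBodyA_shift f rf v pd a n
      rw [hsh, List.foldl_map, PySem.List.foldl_congr_mem _ _ _ _ hbody]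
      rw [ih pd (acc + pvContrib (v, f)) (fun i hi hk => by
        have := hpre (i + 1) (by simpa using hi) (by simpa using hk)
        simpa using this)]
      simp [List.zip_cons_cons]
      ring

-- B's staged counts-and-sums expression, named for the induction
def pvStaged (pairs : List (Int × String)) : Int :=
  (((pairs.filter (fun vf => vf.1 == 1)).map (fun vf => vf.2)).count "SEX" : Int)
    + 2 * (((pairs.filter (fun vf => vf.1 == 1)).map (fun vf => vf.2)).count "CCS>II" : Int)
    + 2 * (((pairs.filter (fun vf => vf.1 == 1)).map (fun vf => vf.2)).count "hf" : Int)
    + (((pairs.filter (fun vf => vf.1 == 1)).map (fun vf => vf.2)).count "DEP ST" : Int)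
    + ((pairs.filter (fun vf => vf.2 == "Age")).map (fun vf =>
        8 * (if vf.1 ≥ 50 then (1:Int) else 0) + (if vf.1 ≥ 60 then (1:Int) else 0)
          + 2 * (if vf.1 ≥ 70 then (1:Int) else 0) + (if vf.1 ≥ 80 then (1:Int) else 0))).sum

lemma pvStaged_cons (v : Int) (f : String) (pairs : List (Int × String)) :
    pvStaged ((v, f) :: pairs) = pvContrib (v, f) + pvStaged pairs := by
  by_cases hv : v = 1 <;> by_cases hA : f = "Age"
  · simp [pvStaged, pvContrib, hv, hA, List.filter_cons, List.count_cons] <;> (try push_cast) <;> (try ring)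
  · by_cases h1 : f = "SEX"
    · simp [pvStaged, pvContrib, hv, hA, h1, List.filter_cons, List.count_cons] <;> (try push_cast) <;> (try ring)
    · by_cases h2 : f = "CCS>II"
      · simp [pvStaged, pvContrib, hv, hA, h1, h2, List.filter_cons, List.count_cons] <;> (try push_cast) <;> (try ring)
      · by_cases h3 : f = "hf"
        · simp [pvStaged, pvContrib, hv, hA, h1, h2, h3, List.filter_cons, List.count_cons] <;> (try push_cast) <;> (try ring)
        · by_cases h4 : f = "DEP ST"
          · simp [pvStaged, pvContrib, hv, hA, h1, h2, h3, h4, List.filter_cons, List.count_cons] <;> (try push_cast) <;> (try ring)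
          · simp [pvStaged, pvContrib, hv, hA, h1, h2, h3, h4, List.filter_cons, List.count_cons]
  · simp [pvStaged, pvContrib, hv, hA, List.filter_cons, List.count_cons] <;> (try push_cast) <;> (try ring)
  · simp [pvStaged, pvContrib, hv, hA, List.filter_cons, List.count_cons]

-- B's staged expression equals the sum of pvContrib
lemma pvStaged_eq (pairs : List (Int × String)) :
    pvStaged pairs = (pairs.map pvContrib).sum := by
  induction pairs with
  | nil => simp [pvStaged]
  | cons vf pairs ih =>
    obtain ⟨v, f⟩ := vf
    rw [pvStaged_cons, ih, List.map_cons, List.sum_cons]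

-- ===== VERDICT (by name: the statement is the Claim_ definition above) =====
theorem pursuit_spec : Claim_equal_pursuit := by
  intro pd rf th _ hpre
  unfold Spec_pursuit pursuit pursuit_alt
  rw [show (fun (risk i : Int) =>
      let factor := PySem.List.pyGetD rf i ""
      if factor == "Age" then
        let age := PySem.List.pyGetD pd i 0
        if age ≥ 50 ∧ age ≤ 59 then risk + 8
        else if age ≥ 60 ∧ age ≤ 69 then risk + 9
        else if age ≥ 70 ∧ age ≤ 79 then risk + 11
        else if age ≥ 80 then risk + 12
        else risk
      else if factor == "SEX" then
        (if PySem.List.pyGetD pd i 0 == 1 then risk + 1 else risk)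
      else if factor == "CCS>II" then
        (if PySem.List.pyGetD pd i 0 == 1 then risk + 2 else risk)
      else if factor == "hf" then
        (if PySem.List.pyGetD pd i 0 == 1 then risk + 2 else risk)
      else if factor == "DEP ST" then
        (if PySem.List.pyGetD pd i 0 == 1 then risk + 1 else risk)
      else risk) = pvBodyA pd rf from rfl]
  rw [pvLoopA_eq rf pd 0 hpre]
  have h := pvStaged_eq (pd.zip rf)
  simp only [pvStaged] at h
  simp only [zero_add, ← h]
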